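-- pv_equiv track=rewrite | github.com/baegopa-always/algorithm | hanghae99/240313/PS_05.py | get
-- ===== SOURCE A (Python) =====
-- def gcd(a, b):
--     if a == 0:
--         return b
--     return gcd(b % a, a)
--
-- def get(arrayA, arrayB):
--     result = arrayA[0]
--     for x in arrayA:
--         result = gcd(result, x)
--     if result == 0:
--         return result
--     for x in arrayB:
--         if x % result == 0:
--             return 0
--     return result
-- ===== SOURCE B (Python) =====
-- def get(arrayA, arrayB):
--     g = arrayA[0]
--     for x in arrayA[1:]:
--         a, b = g, x
--         while a != 0:
--             a, b = b % a, a
--         g = b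
--     if g == 0 or any(x % g == 0 for x in arrayB):
--         return 0
--     return g
-- ===== Notes on version B (the rewrite author's own statement) =====
-- stated objective: simpler
-- what changed: Recursive Euclid helper replaced by an inlined iterative while-loop (no helper function, no recursion), the redundant re-gcd of arrayA[0] dropped by folding over arrayA[1:], and the early-return scan of arrayB collapsed into a single boolean any() test.
import Mathlib
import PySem

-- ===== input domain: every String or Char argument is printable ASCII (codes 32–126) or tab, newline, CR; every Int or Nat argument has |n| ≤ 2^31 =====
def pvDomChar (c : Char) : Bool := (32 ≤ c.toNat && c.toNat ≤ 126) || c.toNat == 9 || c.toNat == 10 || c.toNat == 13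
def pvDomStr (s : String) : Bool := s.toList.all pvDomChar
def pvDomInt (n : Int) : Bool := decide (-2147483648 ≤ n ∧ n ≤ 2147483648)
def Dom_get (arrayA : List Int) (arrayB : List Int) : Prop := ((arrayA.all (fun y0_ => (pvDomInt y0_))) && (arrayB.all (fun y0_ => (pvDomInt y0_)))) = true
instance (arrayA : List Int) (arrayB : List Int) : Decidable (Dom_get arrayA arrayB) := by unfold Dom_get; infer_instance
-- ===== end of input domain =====

-- B replaces A's recursive Euclid helper by an inlined iterative while-loop and
-- collapses the arrayB scan into a single boolean `any` test (objective: simpler).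

-- termination measure for Python's gcd recursion: |b % a| < |a| when a ≠ 0
theorem pyMod_natAbs_lt (b a : Int) (h : a ≠ 0) :
    (PySem.Int.mod b a).natAbs < a.natAbs := by
  rcases lt_or_gt_of_ne h with hn | hp
  · have := PySem.Int.mod_neg_bounds b hn
    omega
  · have h1 := PySem.Int.mod_nonneg b hp
    have h2 := PySem.Int.mod_lt b hp
    omega

-- ===== PORT A =====
-- def gcd(a, b): if a == 0: return b; return gcd(b % a, a)
def gcdA (a b : Int) : Int :=
  if a = 0 then b else gcdA (PySem.Int.mod b a) a
termination_by a.natAbs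
decreasing_by exact pyMod_natAbs_lt b a (by assumption)

-- the second for-loop of A, with its early `return 0`
def scanA (result : Int) : List Int → Int
  | [] => result
  | x :: rest => if PySem.Int.mod x result = 0 then 0 else scanA result rest

def get (arrayA : List Int) (arrayB : List Int) : Int :=
  -- result = arrayA[0]  (none = IndexError, excluded by Pre_get)
  let result0 := (PySem.List.pyGet? arrayA 0).getD 0
  let result := arrayA.foldl (fun r x => gcdA r x) result0
  if result = 0 then result else scanA result arrayB

-- ===== PORT B =====
-- the inlined `while a != 0: a, b = b % a, a` loop of Source B
def gcdLoop (a b : Int) : Int :=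
  if a = 0 then b else gcdLoop (PySem.Int.mod b a) a
termination_by a.natAbs
decreasing_by exact pyMod_natAbs_lt b a (by assumption)

def get_alt (arrayA : List Int) (arrayB : List Int) : Int :=
  match arrayA with
  | [] => 0  -- g = arrayA[0] raises IndexError in Python; excluded by Pre_get
  | a0 :: rest =>
    let g := rest.foldl (fun g x => gcdLoop g x) a0
    if g = 0 || arrayB.any (fun x => PySem.Int.mod x g = 0) then 0 else g

-- ===== PRECONDITION & SPEC =====
-- A evaluates arrayA[0]: the empty arrayA raises IndexError, hence is excluded.
def Pre_get (arrayA : List Int) (arrayB : List Int) : Prop := arrayA ≠ []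
instance (arrayA : List Int) (arrayB : List Int) : Decidable (Pre_get arrayA arrayB) := by
  unfold Pre_get; infer_instance
def pvWitness_get : List Int × List Int := ([12, 18], [5, 36])

def Spec_get (arrayA : List Int) (arrayB : List Int) (out : Int) : Prop := out = get_alt arrayA arrayB
instance (arrayA : List Int) (arrayB : List Int) (out : Int) : Decidable (Spec_get arrayA arrayB out) := by unfold Spec_get; infer_instance

-- ===== CLAIM (what is proved, stated in full; the proofs are below) =====
def Claim_equal_get : Prop := ∀ (arrayA : List Int) (arrayB : List Int), Dom_get arrayA arrayB → Pre_get arrayA arrayB → Spec_get arrayA arrayB (get arrayA arrayB)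

-- ===== LEMMAS AND PROOFS =====

theorem gcdLoop_eq_gcdA (a b : Int) : gcdLoop a b = gcdA a b := by
  fun_induction gcdLoop a b
  all_goals rw [gcdA]; simp [*]

theorem gcdA_self (a : Int) : gcdA a a = a := by
  rw [gcdA]
  by_cases h : a = 0
  · simp [h]
  · have hm : PySem.Int.mod a a = 0 := (PySem.Int.mod_eq_zero_iff_dvd a a).mpr dvd_rfl
    simp [h, hm, gcdA]

theorem scanA_eq_any (g : Int) (bs : List Int) :
    scanA g bs = if bs.any (fun x => PySem.Int.mod x g = 0) then 0 else g := by
  induction bs with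
  | nil => simp [scanA]
  | cons x rest ih =>
    by_cases hx : PySem.Int.mod x g = 0
    · simp [scanA, hx]
    · simp [scanA, hx, ih]

-- ===== VERDICT (by name: the statement is the Claim_ definition above) =====
theorem get_spec : Claim_equal_get := by
  intro arrayA arrayB _ hpre
  unfold Spec_get
  match arrayA with
  | [] => exact absurd rfl hpre
  | a0 :: rest =>
    show _root_.get (a0 :: rest) arrayB = get_alt (a0 :: rest) arrayB
    unfold _root_.get get_alt
    simp only [PySem.List.pyGet?, PySem.List.pyIdx?]
    have hfold : (a0 :: rest).foldl (fun r x => gcdA r x) a0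
        = rest.foldl (fun g x => gcdLoop g x) a0 := by
      simp only [List.foldl_cons, gcdA_self]
      apply PySem.List.foldl_congr_mem
      intro acc x _
      exact (gcdLoop_eq_gcdA acc x).symm
    norm_num [hfold]
    set g := rest.foldl (fun g x => gcdLoop g x) a0 with hg
    by_cases h0 : g = 0
    · simp [h0]
    · by_cases hb : arrayB.any (fun x => PySem.Int.mod x g = 0) = true
      · obtain ⟨x, hx, hmx⟩ := List.any_eq_true.mp hb
        simp [h0, hb, scanA_eq_any]
        intro hall
        exact absurd (of_decide_eq_true hmx) (hall x hx)
      · simp only [List.any_eq_true, decide_eq_true_eq, not_exists, not_and] at hb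
        simp [h0, scanA_eq_any]
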